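-- pv_equiv track=rewrite | github.com/yubinbai/Codejam | practice 2008/squareCover/main.py | solve
-- ===== SOURCE A (Python) =====
-- infinity = 1 << 15
--
-- def solve(n, k, points):
--     combinations = []
--     generate(n, k, combinations)
--
--     # memoize the distance
--     d = {}
--     for i in range(n):
--         for j in range(i):
--             d[(j, i)] = max(abs(points[i][0] - points[j][0]), \
--                            abs(points[i][1] - points[j][1]))
--     currMin = infinity
--     for c in combinations:
--         newMin = _validate(c, d, currMin)
--         currMin = min(newMin, currMin)
--     return currMin
--
-- def generate(n, k, combinations):
--     sepPos = []
--     _generate(n, k, sepPos, combinations)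
--
-- def _generate(n, k, sepPos, combinations):
--     if k - 1 == len(sepPos):
--         c = []
--         prev = 0
--         for i in sepPos:
--             curr = []
--             for j in range(prev, i):
--                 curr.append(j)
--             prev = i
--             c.append(curr)
--         curr = []
--         for j in range(prev, n):
--             curr.append(j)
--         c.append(curr)
--         combinations.append(c)
--         return
--     start = 0
--     if len(sepPos) > 0:
--         start = sepPos[-1]
--     for i in range(start + 1, n):
--         sepPos.append(i)
--         _generate(n, k, sepPos, combinations)
--         sepPos.pop()
--
-- def _validate(c, d, currMin):
--     maxD = 0
--     for group in c:
--         for i in group: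
--             for j in group:
--                 if j < i:
--                     maxD = max(maxD, d[(j, i)])
--                     if maxD >= currMin:
--                         return currMin
--     return maxD
-- ===== SOURCE B (Python) =====
-- infinity = 1 << 15
--
-- def solve(n, k, points):
--     # DP over suffixes: best[a] = minimal (over splits of points[a:m] into g
--     # contiguous nonempty groups) maximal group Chebyshev diameter.
--     if k < 1:
--         return infinity
--     m = n if n > 0 else 0
--     if k > 1 and k > m:          # no partition of m points into k nonempty groups
--         return infinity
--     BIG = 1 << 62
--     # cost[a][b] = Chebyshev diameter of points[a:b] (0 when fewer than 2 points),
--     # grown incrementally: adding point b-1 adds its distances to points[a:b-1].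
--     cost = []
--     for a in range(m):
--         row = [0] * (a + 1)
--         best = 0
--         for b in range(a + 1, m + 1):
--             for j in range(a, b - 1):
--                 dx = points[j][0] - points[b - 1][0]
--                 dy = points[j][1] - points[b - 1][1]
--                 t = max(abs(dx), abs(dy))
--                 if best < t:
--                     best = t
--             row.append(best)
--         cost.append(row)
--     cost.append([0] * (m + 1))
--     dp = [cost[a][m] for a in range(m + 1)]          # one group
--     for _ in range(k - 1):                            # add one leading group
--         dp = [min((max(cost[a][i], dp[i]) for i in range(a + 1, m)), default=BIG)
--               for a in range(m + 1)]
--     ans = dp[0]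
--     return ans if ans < infinity else infinity
-- ===== Notes on version B (the rewrite author's own statement) =====
-- stated objective: alternative
-- what changed: A enumerates every composition of the n points into k contiguous groups (C(n-1,k-1) partitions, re-scanning all pairs in each); B instead computes interval Chebyshev diameters once into an incrementally grown table and runs a suffix dynamic program over split positions, capping the result at the module constant infinity exactly as A's initial currMin does.
import Mathlib
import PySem

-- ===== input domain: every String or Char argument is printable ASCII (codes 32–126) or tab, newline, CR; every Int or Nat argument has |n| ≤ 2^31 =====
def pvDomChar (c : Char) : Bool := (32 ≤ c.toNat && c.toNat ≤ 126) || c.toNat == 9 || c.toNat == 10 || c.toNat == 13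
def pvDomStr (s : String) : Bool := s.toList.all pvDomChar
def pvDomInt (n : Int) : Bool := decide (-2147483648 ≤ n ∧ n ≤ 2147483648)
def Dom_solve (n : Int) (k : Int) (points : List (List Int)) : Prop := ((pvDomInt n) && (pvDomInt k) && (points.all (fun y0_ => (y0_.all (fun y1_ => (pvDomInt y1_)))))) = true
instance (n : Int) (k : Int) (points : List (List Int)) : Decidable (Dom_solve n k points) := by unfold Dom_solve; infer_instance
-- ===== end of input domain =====

-- B replaces A's exhaustive enumeration of all contiguous k-partitions by a suffix
-- dynamic program over split positions with an incrementally grown interval-diameter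
-- table; equivalence of the RETURN value is proved on Pre_ (where the Python A returns).

-- ===== PORT A =====
def pvInfinity : Int := 32768   -- infinity = 1 << 15

-- points[i][c]; on admitted inputs every such access is in range, so the default is never used
def pvAt (points : List (List Int)) (i c : Int) : Int :=
  PySem.List.pyGetD (PySem.List.pyGetD points i []) c 0

-- max(abs(points[i][0]-points[j][0]), abs(points[i][1]-points[j][1]))
def pvCheb (points : List (List Int)) (j i : Int) : Int :=
  max |pvAt points i 0 - pvAt points j 0| |pvAt points i 1 - pvAt points j 1|

-- the memoized distance dict d
def pvBuildD (n : Int) (points : List (List Int)) : PySem.Dict (Int × Int) Int :=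
  (PySem.List.pyRange 0 n 1).foldl (fun d i =>
    (PySem.List.pyRange 0 i 1).foldl (fun d j => d.insert (j, i) (pvCheb points j i)) d)
    PySem.Dict.empty

-- the partition built from sepPos at the base of _generate
def pvBuild (n : Int) (sepPos : List Int) : List (List Int) :=
  let st := sepPos.foldl
    (fun (st : Int × List (List Int)) i =>
      (i, st.2 ++ [(PySem.List.pyRange st.1 i 1).foldl (fun c j => c ++ [j]) []]))
    (0, ([] : List (List Int)))
  st.2 ++ [(PySem.List.pyRange st.1 n 1).foldl (fun c j => c ++ [j]) []]

-- _generate (sepPos.append/pop becomes passing sepPos ++ [i])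
def pvGen (n k : Int) (sepPos : List Int) : List (List (List Int)) :=
  if k - 1 = (sepPos.length : Int) then [pvBuild n sepPos]
  else
    (PySem.List.pyRange (sepPos.getLastD 0 + 1) n 1).attach.foldl
      (fun acc i => acc ++ pvGen n k (sepPos ++ [i.1])) []
termination_by (n - sepPos.getLastD 0).toNat
decreasing_by
  have h := (PySem.List.mem_pyRange_one).1 i.2
  simp only [List.getLastD_concat]
  omega

-- one step of the j-loop of _validate (none = the early 'return currMin' was taken)
def pvVStep (d : PySem.Dict (Int × Int) Int) (currMin i : Int)
    (st : Option Int) (j : Int) : Option Int :=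
  match st with
  | none => none
  | some m =>
    if j < i then
      let m' := max m (d.getD (j, i) 0)
      if currMin ≤ m' then none else some m'
    else some m

-- _validate
def pvValidate (c : List (List Int)) (d : PySem.Dict (Int × Int) Int) (currMin : Int) : Int :=
  match c.foldl (fun st group => group.foldl (fun st i => group.foldl (pvVStep d currMin i) st) st)
      (some (0 : Int)) with
  | some m => m
  | none => currMin

def solve (n : Int) (k : Int) (points : List (List Int)) : Int :=
  let combinations := pvGen n k []
  let d := pvBuildD n points
  combinations.foldl (fun currMin c => min (pvValidate c d currMin) currMin) pvInfinity

-- ===== PORT B =====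
def pvBIG : Int := 4611686018427387904   -- 1 << 62

-- t = max(abs(points[j][0]-points[b-1][0]), abs(points[j][1]-points[b-1][1]))
def pvChebB (points : List (List Int)) (j i : Int) : Int :=
  max |pvAt points j 0 - pvAt points i 0| |pvAt points j 1 - pvAt points i 1|

-- the row cost[a]: entries 0 for b ≤ a, then grown incrementally
def pvCostRow (points : List (List Int)) (a m : Int) : List Int :=
  let st := (PySem.List.pyRange (a + 1) (m + 1) 1).foldl
    (fun (st : Int × List Int) b =>
      let best := (PySem.List.pyRange a (b - 1) 1).foldl
        (fun best j => let t := pvChebB points j (b - 1); if best < t then t else best) st.1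
      (best, st.2 ++ [best]))
    (0, List.replicate (a + 1).toNat 0)
  st.2

def pvCost (points : List (List Int)) (m : Int) : List (List Int) :=
  ((PySem.List.pyRange 0 m 1).foldl (fun acc a => acc ++ [pvCostRow points a m]) [])
    ++ [List.replicate (m + 1).toNat 0]

def solve_alt (n : Int) (k : Int) (points : List (List Int)) : Int :=
  if k < 1 then pvInfinity
  else
    let m := if 0 < n then n else 0
    -- no partition of m points into k nonempty groups
    if 1 < k ∧ m < k then pvInfinity
    else
    let cost := pvCost points m
    let dp0 := (PySem.List.pyRange 0 (m + 1) 1).map (fun a => pvAt cost a m)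
    let dp := (PySem.List.pyRange 0 (k - 1) 1).foldl
      (fun dp _ =>
        (PySem.List.pyRange 0 (m + 1) 1).map (fun a =>
          (PySem.List.pyRange (a + 1) m 1).foldl
            (fun best i => min best (max (pvAt cost a i) (PySem.List.pyGetD dp i 0)))
            pvBIG))
      dp0
    let ans := PySem.List.pyGetD dp 0 0
    if ans < pvInfinity then ans else pvInfinity

-- ===== PRECONDITION & SPEC =====
-- Pre_ excludes exactly the inputs on which the Python A raises IndexError:
-- n larger than len(points), or one of the first n rows having fewer than 2 entries.
def Pre_solve (n : Int) (k : Int) (points : List (List Int)) : Prop :=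
  n ≤ (points.length : Int) ∧ ∀ r ∈ points.take n.toNat, 2 ≤ (r.length : Int)
instance (n : Int) (k : Int) (points : List (List Int)) : Decidable (Pre_solve n k points) := by
  unfold Pre_solve; infer_instance

def pvWitness_solve : Int × Int × List (List Int) := (3, 2, [[0, 0], [6, 1], [5, 5]])

def Spec_solve (n : Int) (k : Int) (points : List (List Int)) (out : Int) : Prop := out = solve_alt n k points
instance (n : Int) (k : Int) (points : List (List Int)) (out : Int) : Decidable (Spec_solve n k points out) := by unfold Spec_solve; infer_instance

-- ===== CLAIM (what is proved, stated in full; the proofs are below) =====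
def Claim_equal_solve : Prop := ∀ (n : Int) (k : Int) (points : List (List Int)), Dom_solve n k points → Pre_solve n k points → Spec_solve n k points (solve n k points)


-- ===== LEMMAS AND PROOFS =====

-- ---------- proof-side spec objects ----------

-- Chebyshev diameter of the index interval [a, a+t), as a running max of pair distances
def pvDn (points : List (List Int)) (a : Int) : Nat → Int
  | 0 => 0
  | t+1 => (PySem.List.pyRange a (a + t) 1).foldl
      (fun best j => max best (pvCheb points j (a + t))) (pvDn points a t)

def pvDint (points : List (List Int)) (a b : Int) : Int := pvDn points a (b - a).toNat

def pvOMin : Option Int → Option Int → Option Int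
  | none, o => o
  | some x, none => some x
  | some x, some y => some (min x y)

def pvListMin (l : List Int) : Option Int := l.foldl (fun acc v => pvOMin acc (some v)) none

-- minimum over partitions of [prev, b) into r+1 contiguous nonempty groups of the
-- maximal group diameter (none when no such partition exists)
def pvR (points : List (List Int)) (b : Int) : Nat → Int → Option Int
  | 0, prev => some (pvDint points prev b)
  | r+1, prev => (PySem.List.pyRange (prev + 1) b 1).foldl
      (fun acc i => pvOMin acc (Option.map (max (pvDint points prev i)) (pvR points b r i))) none

-- running max of a partition determined by separators
def pvPref (points : List (List Int)) : Int → List Int → Int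
  | _, [] => 0
  | prev, s :: ss => max (pvDint points prev s) (pvPref points s ss)

def pvPartMax (points : List (List Int)) (n : Int) : Int → List Int → Int
  | prev, [] => pvDint points prev n
  | prev, s :: ss => max (pvDint points prev s) (pvPartMax points n s ss)

-- the groups a separator list describes
def pvGroups (n : Int) : Int → List Int → List (List Int)
  | prev, [] => [PySem.List.pyRange prev n 1]
  | prev, s :: ss => PySem.List.pyRange prev s 1 :: pvGroups n s ss

-- the pure (no early exit) value of _validate's triple loop
def pvPm (d : PySem.Dict (Int × Int) Int) (c : List (List Int)) : Int :=
  c.foldl (fun m g => g.foldl (fun m i =>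
    g.foldl (fun m j => if j < i then max m (d.getD (j, i) 0) else m) m) m) 0

-- ---------- generic fold lemmas ----------

theorem pv_foldl_mono {α : Type} (pstep : Int → α → Int) (h : ∀ m x, m ≤ pstep m x) :
    ∀ (l : List α) (m : Int), m ≤ l.foldl pstep m := by
  intro l
  induction l with
  | nil => intro m; simp
  | cons x t ih => intro m; exact le_trans (h m x) (ih (pstep m x))

theorem pv_optfold_none {α : Type} (ostep : Option Int → α → Option Int)
    (hnone : ∀ x, ostep none x = none) :
    ∀ (l : List α), l.foldl ostep none = none := by
  intro l
  induction l with
  | nil => rfl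
  | cons x t ih => simp [List.foldl, hnone x, ih]

theorem pv_optfold {α : Type} (cm : Int) (pstep : Int → α → Int)
    (ostep : Option Int → α → Option Int)
    (hmono : ∀ m x, m ≤ pstep m x)
    (hnone : ∀ x, ostep none x = none)
    (hsome : ∀ m x, m < cm → ostep (some m) x = if cm ≤ pstep m x then none else some (pstep m x)) :
    ∀ (l : List α) (m : Int), m < cm →
      l.foldl ostep (some m) = if cm ≤ l.foldl pstep m then none else some (l.foldl pstep m) := by
  intro l
  induction l with
  | nil => intro m hm; simp [List.foldl]; omega
  | cons x t ih =>
    intro m hm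
    simp only [List.foldl]
    rw [hsome m x hm]
    by_cases h : cm ≤ pstep m x
    · rw [if_pos h, pv_optfold_none ostep hnone]
      have := pv_foldl_mono pstep hmono t (pstep m x)
      rw [if_pos (by omega)]
    · rw [if_neg h]
      exact ih (pstep m x) (by omega)

theorem pv_optfold_ge {α : Type} (ostep : Option Int → α → Option Int)
    (hnone : ∀ x, ostep none x = none)
    (hmonoO : ∀ (m : Int) (x : α) (m' : Int), ostep (some m) x = some m' → m ≤ m') :
    ∀ (l : List α) (m m' : Int), l.foldl ostep (some m) = some m' → m ≤ m' := by
  intro l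
  induction l with
  | nil => intro m m' h; simp [List.foldl] at h; omega
  | cons x t ih =>
    intro m m' h
    simp only [List.foldl] at h
    cases hx : ostep (some m) x with
    | none => rw [hx, pv_optfold_none ostep hnone] at h; exact absurd h (by simp)
    | some m1 => rw [hx] at h; exact le_trans (hmonoO m x m1 hx) (ih m1 m' h)

theorem pv_foldmax_shift {α : Type} (f : α → Int) :
    ∀ (l : List α) (a b : Int),
      l.foldl (fun m x => max m (f x)) (max a b) = max a (l.foldl (fun m x => max m (f x)) b) := by
  intro l
  induction l with
  | nil => intro a b; rfl
  | cons x t ih =>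
    intro a b
    simp only [List.foldl]
    rw [max_assoc, ih]

theorem pv_foldmax_nonneg {α : Type} (f : α → Int) (l : List α) (m : Int) (hm : 0 ≤ m) :
    0 ≤ l.foldl (fun acc x => max acc (f x)) m :=
  le_trans hm (pv_foldl_mono _ (fun m x => le_max_left _ _) l m)

theorem pv_foldmax_bound {α : Type} (f : α → Int) (B : Int) :
    ∀ (l : List α) (m : Int), m ≤ B → (∀ x ∈ l, f x ≤ B) →
      l.foldl (fun acc x => max acc (f x)) m ≤ B := by
  intro l
  induction l with
  | nil => intro m hm _; exact hm
  | cons x t ih =>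
    intro m hm hf
    simp only [List.foldl]
    exact ih (max m (f x)) (max_le hm (hf x (List.mem_cons_self ..)))
      (fun y hy => hf y (List.mem_cons_of_mem _ hy))

-- ---------- the early-exit _validate equals the pure triple loop ----------

theorem pv_validate_min (c : List (List Int)) (d : PySem.Dict (Int × Int) Int) (cm : Int) :
    min (pvValidate c d cm) cm = min (pvPm d c) cm := by
  -- pure steps of the three nested loops
  set pJ : Int → Int → Int → Int :=
    fun i m j => if j < i then max m (d.getD (j, i) 0) else m with hpJ
  have hJmono : ∀ (i m : Int) (j : Int), m ≤ pJ i m j := by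
    intro i m j
    simp only [hpJ]
    split
    · exact le_max_left _ _
    · exact le_refl m
  have hJnone : ∀ (i : Int) (j : Int), pvVStep d cm i none j = none := by
    intro i j; rfl
  have hJsome : ∀ (i m : Int) (j : Int), m < cm →
      pvVStep d cm i (some m) j
        = if cm ≤ pJ i m j then none else some (pJ i m j) := by
    intro i m j hm
    simp only [pvVStep, hpJ]
    by_cases h : j < i
    · simp only [if_pos h]
    · simp only [if_neg h, if_neg (by omega : ¬ cm ≤ m)]
  have hJge : ∀ (i m : Int) (j : Int) (m' : Int),
      pvVStep d cm i (some m) j = some m' → m ≤ m' := by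
    intro i m j m' h
    simp only [pvVStep] at h
    by_cases hj : j < i
    · rw [if_pos hj] at h
      by_cases hc : cm ≤ max m (d.getD (j, i) 0)
      · rw [if_pos hc] at h; exact absurd h (by simp)
      · rw [if_neg hc] at h
        have : m' = max m (d.getD (j, i) 0) := by injection h; omega
        omega
    · rw [if_neg hj] at h
      have : m' = m := by injection h; omega
      omega
  -- the i-level steps
  have hImono : ∀ (g : List Int) (m i : Int), m ≤ g.foldl (pJ i) m := by
    intro g m i; exact pv_foldl_mono (pJ i) (hJmono i) g m
  have hInone : ∀ (g : List Int) (i : Int), g.foldl (pvVStep d cm i) none = none := by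
    intro g i; exact pv_optfold_none (pvVStep d cm i) (hJnone i) g
  have hIsome : ∀ (g : List Int) (m i : Int), m < cm →
      g.foldl (pvVStep d cm i) (some m)
        = if cm ≤ g.foldl (pJ i) m then none else some (g.foldl (pJ i) m) := by
    intro g m i hm
    exact pv_optfold cm (pJ i) (pvVStep d cm i) (hJmono i) (hJnone i) (hJsome i) g m hm
  have hIge : ∀ (g : List Int) (m i m' : Int),
      g.foldl (pvVStep d cm i) (some m) = some m' → m ≤ m' := by
    intro g m i m' h
    exact pv_optfold_ge (pvVStep d cm i) (hJnone i) (hJge i) g m m' h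
  -- the group-level steps
  set pG : Int → List Int → Int := fun m g => g.foldl (fun m i => g.foldl (pJ i) m) m with hpG
  set oG : Option Int → List Int → Option Int :=
    fun st g => g.foldl (fun st i => g.foldl (pvVStep d cm i) st) st with hoG
  have hGmono : ∀ (m : Int) (g : List Int), m ≤ pG m g := by
    intro m g
    exact pv_foldl_mono _ (fun m i => hImono g m i) g m
  have hGnone : ∀ (g : List Int), oG none g = none := by
    intro g
    simp only [hoG]
    exact pv_optfold_none _ (fun i => hInone g i) g
  have hGsome : ∀ (m : Int) (g : List Int), m < cm →
      oG (some m) g = if cm ≤ pG m g then none else some (pG m g) := by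
    intro m g hm
    simp only [hoG, hpG]
    exact pv_optfold cm _ _ (fun m i => hImono g m i) (fun i => hInone g i)
      (fun m i hm => hIsome g m i hm) g m hm
  have hGge : ∀ (m : Int) (g : List Int) (m' : Int), oG (some m) g = some m' → m ≤ m' := by
    intro m g m' h
    exact pv_optfold_ge _ (fun i => hInone g i) (fun m i m' h => hIge g m i m' h) g m m' h
  have hPm : pvPm d c = c.foldl pG 0 := rfl
  have hVal : pvValidate c d cm
      = (match c.foldl oG (some (0 : Int)) with | some m => m | none => cm) := rfl
  have hPnonneg : 0 ≤ c.foldl pG 0 := pv_foldl_mono pG hGmono c 0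
  by_cases hcm : 0 < cm
  · have := pv_optfold cm pG oG hGmono hGnone hGsome c 0 hcm
    rw [hVal, this, hPm]
    by_cases h : cm ≤ c.foldl pG 0
    · simp only [if_pos h]
      simp only [min_def]
      split_ifs <;> omega
    · simp only [if_neg h]
  · rw [hVal, hPm]
    cases h : c.foldl oG (some (0 : Int)) with
    | none =>
      simp only [min_def]
      split_ifs <;> omega
    | some m =>
      have hm : 0 ≤ m := pv_optfold_ge oG hGnone hGge c 0 m h
      simp only [min_def]
      split_ifs <;> omega

-- ---------- the dict lookups are the pair distances ----------

theorem pv_buildD_inner (points : List (List Int)) (i : Int) :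
    ∀ (l : List Int) (d : PySem.Dict (Int × Int) Int) (j0 i0 : Int),
      (l.foldl (fun d j => d.insert (j, i) (pvCheb points j i)) d).getD (j0, i0) 0
        = if j0 ∈ l ∧ i0 = i then pvCheb points j0 i0 else d.getD (j0, i0) 0 := by
  intro l
  induction l with
  | nil => intro d j0 i0; simp
  | cons x t ih =>
    intro d j0 i0
    simp only [List.foldl]
    rw [ih]
    by_cases h1 : j0 ∈ t ∧ i0 = i
    · rw [if_pos h1, if_pos ⟨List.mem_cons_of_mem _ h1.1, h1.2⟩]
    · rw [if_neg h1, PySem.Dict.getD_insert]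
      by_cases h2 : j0 = x ∧ i0 = i
      · obtain ⟨h2a, h2b⟩ := h2
        subst h2a; subst h2b
        rw [if_pos rfl, if_pos ⟨List.mem_cons_self .., rfl⟩]
      · have hne : (j0, i0) ≠ (x, i) := by
          intro hc
          exact h2 ⟨congrArg Prod.fst hc, congrArg Prod.snd hc⟩
        rw [if_neg hne, if_neg (by
          intro hc
          rcases List.mem_cons.1 hc.1 with h | h
          · exact h2 ⟨h, hc.2⟩
          · exact h1 ⟨h, hc.2⟩)]

theorem pv_buildD_outer (points : List (List Int)) :
    ∀ (li : List Int) (d : PySem.Dict (Int × Int) Int) (j0 i0 : Int),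
      (li.foldl (fun d i => (PySem.List.pyRange 0 i 1).foldl
          (fun d j => d.insert (j, i) (pvCheb points j i)) d) d).getD (j0, i0) 0
        = if i0 ∈ li ∧ 0 ≤ j0 ∧ j0 < i0 then pvCheb points j0 i0 else d.getD (j0, i0) 0 := by
  intro li
  induction li with
  | nil => intro d j0 i0; simp
  | cons x t ih =>
    intro d j0 i0
    simp only [List.foldl]
    rw [ih]
    by_cases h1 : i0 ∈ t ∧ 0 ≤ j0 ∧ j0 < i0
    · rw [if_pos h1, if_pos ⟨List.mem_cons_of_mem _ h1.1, h1.2⟩]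
    · rw [if_neg h1, pv_buildD_inner]
      by_cases h2 : j0 ∈ PySem.List.pyRange 0 x 1 ∧ i0 = x
      · have hb := (PySem.List.mem_pyRange_one).1 h2.1
        rw [if_pos h2, if_pos ⟨by rw [h2.2]; exact List.mem_cons_self .., by omega, by omega⟩]
      · rw [if_neg h2, if_neg (by
          intro hc
          rcases List.mem_cons.1 hc.1 with h | h
          · exact h2 ⟨(PySem.List.mem_pyRange_one).2 ⟨hc.2.1, by omega⟩, h⟩
          · exact h1 ⟨h, hc.2⟩)]

theorem pv_buildD_getD (n : Int) (points : List (List Int)) (j i : Int)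
    (hj : 0 ≤ j) (hji : j < i) (hin : i < n) :
    (pvBuildD n points).getD (j, i) 0 = pvCheb points j i := by
  unfold pvBuildD
  rw [pv_buildD_outer]
  rw [if_pos ⟨(PySem.List.mem_pyRange_one).2 ⟨by omega, hin⟩, hj, hji⟩]

theorem pv_dn_nonneg (points : List (List Int)) (a : Int) (t : Nat) : 0 ≤ pvDn points a t := by
  induction t with
  | zero => exact le_refl 0
  | succ t ih => exact pv_foldmax_nonneg _ _ _ ih

theorem pv_pref_nonneg (points : List (List Int)) :
    ∀ (seps : List Int) (prev : Int), 0 ≤ pvPref points prev seps := by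
  intro seps
  induction seps with
  | nil => intro prev; exact le_refl 0
  | cons s ss ih => intro prev; exact le_trans (ih s) (le_max_right _ _)

-- ---------- the triple loop on an interval group ----------

theorem pv_grp (n : Int) (points : List (List Int)) (p q : Int) (hp : 0 ≤ p) (hq : q ≤ n) :
    ∀ (m : Int), 0 ≤ m →
      (PySem.List.pyRange p q 1).foldl (fun m i =>
        (PySem.List.pyRange p q 1).foldl
          (fun m j => if j < i then max m ((pvBuildD n points).getD (j, i) 0) else m) m) m
      = max m (pvDint points p q) := by
  -- skip lemma: a j-loop over values not below i does nothing
  have hskip : ∀ (i : Int) (l : List Int), (∀ j ∈ l, ¬ j < i) → ∀ (m : Int),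
      l.foldl (fun m j => if j < i then max m ((pvBuildD n points).getD (j, i) 0) else m) m = m := by
    intro i l hl
    induction l with
    | nil => intro m; rfl
    | cons x t ih =>
      intro m
      simp only [List.foldl, if_neg (hl x (List.mem_cons_self ..))]
      exact ih (fun j hj => hl j (List.mem_cons_of_mem _ hj)) m
  -- main induction on the interval length
  suffices H : ∀ (t : Nat) (q : Int), (q - p).toNat = t → q ≤ n → ∀ (m : Int), 0 ≤ m →
      (PySem.List.pyRange p q 1).foldl (fun m i =>
        (PySem.List.pyRange p q 1).foldl
          (fun m j => if j < i then max m ((pvBuildD n points).getD (j, i) 0) else m) m) m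
      = max m (pvDint points p q) by
    intro m hm
    exact H (q - p).toNat q rfl hq m hm
  intro t
  induction t with
  | zero =>
    intro q hqp _ m hm
    rw [PySem.List.pyRange_one_eq_nil (by omega)]
    unfold pvDint
    rw [hqp]
    simp only [List.foldl, pvDn]
    omega
  | succ t ih =>
    intro q hqp hqn m hm
    have hsplit : PySem.List.pyRange p q 1
        = PySem.List.pyRange p (q - 1) 1 ++ [q - 1] := by
      have h := PySem.List.pyRange_one_succ_right (a := p) (b := q - 1) (by omega)
      rw [(by omega : q - 1 + 1 = q)] at h
      exact h
    set F : Int → Int → Int := fun m i => (PySem.List.pyRange p q 1).foldl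
      (fun m j => if j < i then max m ((pvBuildD n points).getD (j, i) 0) else m) m with hF
    show (PySem.List.pyRange p q 1).foldl F m = max m (pvDint points p q)
    rw [hsplit, List.foldl_append]
    have hFshort : ∀ (acc i : Int), i ∈ PySem.List.pyRange p (q - 1) 1 →
        F acc i = (PySem.List.pyRange p (q - 1) 1).foldl
          (fun m j => if j < i then max m ((pvBuildD n points).getD (j, i) 0) else m) acc := by
      intro acc i hi
      have hib := (PySem.List.mem_pyRange_one).1 hi
      rw [hF]
      simp only []
      rw [hsplit, List.foldl_append]
      exact hskip i [q - 1] (by intro j hj; simp at hj; omega) _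
    rw [PySem.List.foldl_congr_mem (PySem.List.pyRange p (q - 1) 1) F
      (fun acc i => (PySem.List.pyRange p (q - 1) 1).foldl
        (fun m j => if j < i then max m ((pvBuildD n points).getD (j, i) 0) else m) acc)
      m (fun acc i hi => hFshort acc i hi)]
    rw [ih (q - 1) (by omega) (by omega) m hm]
    simp only [List.foldl]
    rw [hF]
    simp only []
    rw [hsplit, List.foldl_append]
    rw [PySem.List.foldl_congr_mem (PySem.List.pyRange p (q - 1) 1) _
      (fun m j => max m (pvCheb points j (q - 1))) _
      (by
        intro acc j hj
        have hjb := (PySem.List.mem_pyRange_one).1 hj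
        rw [if_pos (by omega), pv_buildD_getD n points j (q - 1) (by omega) (by omega) (by omega)])]
    simp only [List.foldl, if_neg (by omega : ¬ (q - 1 < q - 1))]
    have hd1 : pvDint points p (q - 1) = pvDn points p t := by
      unfold pvDint; rw [(by omega : (q - 1 - p).toNat = t)]
    have hd2 : pvDint points p q = pvDn points p (t + 1) := by
      unfold pvDint; rw [hqp]
    rw [hd1, hd2]
    have hrec : pvDn points p (t + 1)
        = (PySem.List.pyRange p (p + t) 1).foldl
            (fun best j => max best (pvCheb points j (p + t))) (pvDn points p t) := rfl
    rw [hrec]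
    have hpt : p + (t : Int) = q - 1 := by omega
    rw [hpt]
    exact pv_foldmax_shift (fun j => pvCheb points j (q - 1)) (PySem.List.pyRange p (q - 1) 1) m (pvDn points p t)

theorem pv_build_range (l : List Int) :
    l.foldl (fun c j => c ++ [j]) ([] : List Int) = l := by
  simpa using PySem.List.foldl_append_singleton_eq_self (l := l) (acc := [])

theorem pv_build_groups (n : Int) (sepPos : List Int) :
    pvBuild n sepPos = pvGroups n 0 sepPos := by
  suffices H : ∀ (seps : List Int) (prev : Int) (acc : List (List Int)),
      (let st := seps.foldl
        (fun (st : Int × List (List Int)) i =>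
          (i, st.2 ++ [(PySem.List.pyRange st.1 i 1).foldl (fun c j => c ++ [j]) []]))
        (prev, acc)
       st.2 ++ [(PySem.List.pyRange st.1 n 1).foldl (fun c j => c ++ [j]) []])
      = acc ++ pvGroups n prev seps by
    have := H sepPos 0 []
    simpa [pvBuild] using this
  intro seps
  induction seps with
  | nil =>
    intro prev acc
    simp only [List.foldl, pvGroups, pv_build_range]
  | cons x t ih =>
    intro prev acc
    simp only [List.foldl, pvGroups]
    rw [ih x (acc ++ [(PySem.List.pyRange prev x 1).foldl (fun c j => c ++ [j]) []])]
    rw [pv_build_range, List.append_assoc]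
    rfl

theorem pv_pm_groups (n : Int) (points : List (List Int)) :
    ∀ (seps : List Int) (prev m : Int), 0 ≤ prev → 0 ≤ m → (∀ s ∈ seps, 0 ≤ s ∧ s ≤ n) →
      (pvGroups n prev seps).foldl (fun m g => g.foldl (fun m i =>
        g.foldl (fun m j => if j < i then max m ((pvBuildD n points).getD (j, i) 0) else m) m) m) m
      = max m (pvPartMax points n prev seps) := by
  intro seps
  induction seps with
  | nil =>
    intro prev m hprev hm _
    simp only [pvGroups, List.foldl, pvPartMax]
    exact pv_grp n points prev n hprev (le_refl n) m hm
  | cons s ss ih =>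
    intro prev m hprev hm hs
    simp only [pvGroups, List.foldl, pvPartMax]
    rw [pv_grp n points prev s hprev (hs s (List.mem_cons_self ..)).2 m hm]
    have hds : 0 ≤ pvDint points prev s := pv_dn_nonneg points prev _
    rw [ih s (max m (pvDint points prev s)) (hs s (List.mem_cons_self ..)).1
      (by omega) (fun x hx => hs x (List.mem_cons_of_mem _ hx))]
    rw [max_assoc]



theorem pv_partmax_pref (points : List (List Int)) (n : Int) :
    ∀ (seps : List Int) (prev : Int),
      pvPartMax points n prev seps
        = max (pvPref points prev seps) (pvDint points (seps.getLastD prev) n) := by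
  intro seps
  induction seps with
  | nil =>
    intro prev
    simp only [pvPartMax, pvPref, List.getLastD_nil]
    have := pv_dn_nonneg points prev (n - prev).toNat
    unfold pvDint; omega
  | cons s ss ih =>
    intro prev
    simp only [pvPartMax, pvPref, List.getLastD_cons]
    rw [ih s, max_assoc]

theorem pv_pref_append (points : List (List Int)) :
    ∀ (seps : List Int) (prev i : Int),
      pvPref points prev (seps ++ [i])
        = max (pvPref points prev seps) (pvDint points (seps.getLastD prev) i) := by
  intro seps
  induction seps with
  | nil =>
    intro prev i
    simp only [List.nil_append, pvPref, List.getLastD_nil]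
    have := pv_dn_nonneg points prev (i - prev).toNat
    unfold pvDint; omega
  | cons s ss ih =>
    intro prev i
    simp only [List.cons_append, pvPref, List.getLastD_cons]
    rw [ih s, max_assoc]

-- ---------- nonnegativity / bounds of spec values ----------



theorem pv_at_bound (n k : Int) (points : List (List Int)) (h : Dom_solve n k points)
    (i c : Int) : |pvAt points i c| ≤ 2147483648 := by
  have hall : ∀ r ∈ points, ∀ x ∈ r, -2147483648 ≤ x ∧ x ≤ 2147483648 := by
    simp only [Dom_solve, Bool.and_eq_true, List.all_eq_true, pvDomInt, decide_eq_true_eq] at h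
    exact fun r hr x hx => h.2 r hr x hx
  unfold pvAt
  cases hrow : PySem.List.pyGet? points i with
  | none =>
    rw [PySem.List.pyGetD_of_none _ _ _ hrow]
    simp [PySem.List.pyGetD, PySem.List.pyGet?]
  | some row =>
    have hmem := PySem.List.mem_of_pyGet?_eq_some points hrow
    have hrd : PySem.List.pyGetD points i [] = row := by
      unfold PySem.List.pyGetD; rw [hrow]; rfl
    rw [hrd]
    cases hv : PySem.List.pyGet? row c with
    | none =>
      rw [PySem.List.pyGetD_of_none _ _ _ hv]; simp
    | some v =>
      have hvmem := PySem.List.mem_of_pyGet?_eq_some row hv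
      have hvd : PySem.List.pyGetD row c 0 = v := by
        unfold PySem.List.pyGetD; rw [hv]; rfl
      rw [hvd, abs_le]
      have := hall row hmem v hvmem
      omega

theorem pv_cheb_bound (n k : Int) (points : List (List Int)) (h : Dom_solve n k points)
    (j i : Int) : pvCheb points j i ≤ 4294967296 := by
  have h1 := pv_at_bound n k points h i 0
  have h2 := pv_at_bound n k points h j 0
  have h3 := pv_at_bound n k points h i 1
  have h4 := pv_at_bound n k points h j 1
  rw [abs_le] at h1 h2 h3 h4
  unfold pvCheb
  apply max_le
  · rw [abs_le]; omega
  · rw [abs_le]; omega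

theorem pv_dn_bound (n k : Int) (points : List (List Int)) (h : Dom_solve n k points)
    (a : Int) (t : Nat) : pvDn points a t ≤ 4294967296 := by
  induction t with
  | zero => simp [pvDn]
  | succ t ih =>
    exact pv_foldmax_bound _ _ _ _ ih (fun j _ => pv_cheb_bound n k points h j (a + t))

theorem pv_R_bounds (n k : Int) (points : List (List Int)) (h : Dom_solve n k points) (b : Int) :
    ∀ (r : Nat) (prev v : Int), pvR points b r prev = some v → 0 ≤ v ∧ v ≤ 4294967296 := by
  intro r
  induction r with
  | zero =>
    intro prev v hv
    have : v = pvDint points prev b := by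
      simp only [pvR] at hv; injection hv; omega
    subst this
    exact ⟨pv_dn_nonneg points prev _, pv_dn_bound n k points h prev _⟩
  | succ r ih =>
    intro prev v hv
    simp only [pvR] at hv
    have gen : ∀ (l : List Int) (acc : Option Int),
        (∀ w, acc = some w → 0 ≤ w ∧ w ≤ 4294967296) →
        ∀ w, l.foldl (fun acc i =>
            pvOMin acc (Option.map (fun x => max (pvDint points prev i) x) (pvR points b r i)))
            acc = some w → 0 ≤ w ∧ w ≤ 4294967296 := by
      intro l
      induction l with
      | nil => intro acc hacc w hw; exact hacc w hw
      | cons i t iht =>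
        intro acc hacc w hw
        simp only [List.foldl] at hw
        refine iht _ ?_ w hw
        intro w' hw'
        have hD0 : 0 ≤ pvDint points prev i := pv_dn_nonneg points prev _
        have hDB : pvDint points prev i ≤ 4294967296 := pv_dn_bound n k points h prev _
        cases hacc2 : acc with
        | none =>
          cases hri : pvR points b r i with
          | none => rw [hacc2, hri] at hw'; simp [pvOMin] at hw'
          | some u =>
            have hu := ih i u hri
            rw [hacc2, hri] at hw'
            simp only [Option.map, pvOMin] at hw'
            have : w' = max (pvDint points prev i) u := by injection hw'; omega
            subst this
            constructor
            · omega
            · exact max_le hDB hu.2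
        | some a =>
          have ha := hacc a hacc2
          cases hri : pvR points b r i with
          | none =>
            rw [hacc2, hri] at hw'
            simp only [Option.map, pvOMin] at hw'
            have : w' = a := by injection hw'; omega
            subst this; exact ha
          | some u =>
            have hu := ih i u hri
            rw [hacc2, hri] at hw'
            simp only [Option.map, pvOMin] at hw'
            have : w' = min a (max (pvDint points prev i) u) := by injection hw'; omega
            subst this
            have hmb : max (pvDint points prev i) u ≤ 4294967296 := max_le hDB hu.2
            constructor
            · have : 0 ≤ max (pvDint points prev i) u := by omega
              exact le_min ha.1 this
            · exact le_trans (min_le_left _ _) ha.2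
    exact gen _ none (by intro w hw; exact absurd hw (by simp)) v hv

-- ---------- min-fold plumbing ----------

theorem pv_omin_assoc (a b c : Option Int) :
    pvOMin (pvOMin a b) c = pvOMin a (pvOMin b c) := by
  cases a <;> cases b <;> cases c <;> simp [pvOMin] <;> omega

theorem pv_listmin_acc :
    ∀ (l : List Int) (a : Int),
      l.foldl (fun acc v => pvOMin acc (some v)) (some a)
        = some (match pvListMin l with | none => a | some v => min a v) := by
  intro l
  induction l with
  | nil => intro a; rfl
  | cons v t ih =>
    intro a
    show t.foldl (fun acc v => pvOMin acc (some v)) (some (min a v)) = _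
    rw [ih (min a v)]
    have h2 : pvListMin (v :: t) = some (match pvListMin t with | none => v | some w => min v w) := by
      show t.foldl (fun acc v => pvOMin acc (some v)) (some v) = _
      rw [ih v]
    rw [h2]
    cases pvListMin t <;> simp <;> omega

theorem pv_minfold {α : Type} (f : α → Int) :
    ∀ (l : List α) (x : Int),
      l.foldl (fun cm c => min (f c) cm) x
        = (match pvListMin (l.map f) with | none => x | some v => min x v) := by
  intro l
  induction l with
  | nil => intro x; rfl
  | cons c t ih =>
    intro x
    simp only [List.foldl, List.map]
    rw [ih (min (f c) x)]
    have h2 : pvListMin (f c :: t.map f)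
        = some (match pvListMin (t.map f) with | none => f c | some w => min (f c) w) := by
      show (t.map f).foldl (fun acc v => pvOMin acc (some v)) (some (f c)) = _
      rw [pv_listmin_acc]
    rw [h2]
    cases pvListMin (t.map f) <;> simp [min_comm, min_left_comm]

theorem pv_listmin_append (l1 l2 : List Int) :
    pvListMin (l1 ++ l2) = pvOMin (pvListMin l1) (pvListMin l2) := by
  unfold pvListMin
  rw [List.foldl_append]
  cases h : l1.foldl (fun acc v => pvOMin acc (some v)) none with
  | none => simp [pvOMin]
  | some a =>
    rw [pv_listmin_acc l2 a]
    show _ = pvOMin (some a) (pvListMin l2)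
    cases pvListMin l2 <;> simp [pvOMin]

theorem pv_listmin_flatmap {α : Type} (g : α → List Int) :
    ∀ (l : List α),
      pvListMin (l.flatMap g) = l.foldl (fun acc i => pvOMin acc (pvListMin (g i))) none := by
  have gen : ∀ (l : List α) (acc : Option Int),
      l.foldl (fun acc i => pvOMin acc (pvListMin (g i))) acc
        = pvOMin acc (pvListMin (l.flatMap g)) := by
    intro l
    induction l with
    | nil => intro acc; cases acc <;> rfl
    | cons c t ih =>
      intro acc
      simp only [List.foldl, List.flatMap_cons]
      rw [ih, pv_listmin_append, pv_omin_assoc]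
  intro l
  rw [gen l none]
  rfl

theorem pv_map_max_fold {α : Type} (p : Int) (G : α → Option Int) :
    ∀ (l : List α),
      l.foldl (fun acc i => pvOMin acc (Option.map (fun v => max p v) (G i))) none
        = Option.map (fun v => max p v) (l.foldl (fun acc i => pvOMin acc (G i)) none) := by
  have key : ∀ (a b : Option Int),
      pvOMin (Option.map (fun v => max p v) a) (Option.map (fun v => max p v) b)
        = Option.map (fun v => max p v) (pvOMin a b) := by
    intro a b; cases a <;> cases b <;> simp [pvOMin] <;> omega
  have gen : ∀ (l : List α) (acc : Option Int),
      l.foldl (fun acc i => pvOMin acc (Option.map (fun v => max p v) (G i)))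
          (Option.map (fun v => max p v) acc)
        = Option.map (fun v => max p v) (l.foldl (fun acc i => pvOMin acc (G i)) acc) := by
    intro l
    induction l with
    | nil => intro acc; rfl
    | cons c t ih =>
      intro acc
      simp only [List.foldl]
      rw [key, ih]
  intro l
  exact gen l none

-- ---------- the main generation lemma ----------

theorem pv_gen_empty (n k : Int) (hk : k ≤ 0) :
    ∀ (sepPos : List Int), pvGen n k sepPos = [] := by
  suffices H : ∀ (t : Nat) (sepPos : List Int), (n - sepPos.getLastD 0).toNat ≤ t →
      pvGen n k sepPos = [] from fun sp => H (n - sp.getLastD 0).toNat sp (le_refl _)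
  intro t
  induction t with
  | zero =>
    intro sp h0
    rw [pvGen, if_neg (by
      have : (0 : Int) ≤ (sp.length : Int) := Int.natCast_nonneg _
      omega)]
    rw [PySem.List.pyRange_one_eq_nil (by omega)]
    rfl
  | succ t ih =>
    intro sp hle
    rw [pvGen, if_neg (by
      have : (0 : Int) ≤ (sp.length : Int) := Int.natCast_nonneg _
      omega)]
    have gen : ∀ (l : List {x // x ∈ PySem.List.pyRange (sp.getLastD 0 + 1) n 1})
        (acc : List (List (List Int))),
        (∀ x ∈ l, pvGen n k (sp ++ [x.1]) = []) →
        l.foldl (fun acc i => acc ++ pvGen n k (sp ++ [i.1])) acc = acc := by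
      intro l
      induction l with
      | nil => intro acc _; rfl
      | cons x xt iht =>
        intro acc hl
        simp only [List.foldl, hl x (List.mem_cons_self ..), List.append_nil]
        exact iht acc (fun y hy => hl y (List.mem_cons_of_mem _ hy))
    apply gen
    intro x _
    have hxb := (PySem.List.mem_pyRange_one).1 x.2
    apply ih
    rw [List.getLastD_concat]
    omega

theorem pv_main_base (n k : Int) (points : List (List Int)) (sepPos : List Int)
    (h1 : (k - 1 : Int) = (sepPos.length : Int))
    (h4 : ∀ s ∈ sepPos, 0 ≤ s ∧ s ≤ n) :
    pvListMin ((pvGen n k sepPos).map (pvPm (pvBuildD n points)))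
      = Option.map (fun v => max (pvPref points 0 sepPos) v)
          (pvR points n 0 (sepPos.getLastD 0)) := by
  rw [pvGen, if_pos h1]
  have hsingle : pvListMin ([pvBuild n sepPos].map (pvPm (pvBuildD n points)))
      = some (pvPm (pvBuildD n points) (pvBuild n sepPos)) := rfl
  rw [hsingle]
  have hpm : pvPm (pvBuildD n points) (pvBuild n sepPos)
      = max 0 (pvPartMax points n 0 sepPos) := by
    rw [pv_build_groups]
    exact pv_pm_groups n points sepPos 0 0 (le_refl 0) (le_refl 0) h4
  rw [hpm, pv_partmax_pref points n sepPos 0]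
  have hnn1 : 0 ≤ pvPref points 0 sepPos := pv_pref_nonneg points sepPos 0
  have hnn2 : 0 ≤ pvDint points (sepPos.getLastD 0) n := pv_dn_nonneg points _ _
  simp only [pvR, Option.map]
  rw [max_eq_right (by omega : (0:Int) ≤ max (pvPref points 0 sepPos) (pvDint points (sepPos.getLastD 0) n))]

theorem pv_main_step (n k : Int) (points : List (List Int)) (sepPos : List Int) (r : Nat)
    (h1 : (k - 1 : Int) = (sepPos.length : Int) + (r : Int) + 1)
    (h3 : 0 ≤ sepPos.getLastD 0)
    (h4 : ∀ s ∈ sepPos, 0 ≤ s ∧ s ≤ n)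
    (IH : ∀ (i : Int), sepPos.getLastD 0 + 1 ≤ i → i < n →
      pvListMin ((pvGen n k (sepPos ++ [i])).map (pvPm (pvBuildD n points)))
        = Option.map (fun v => max (pvPref points 0 (sepPos ++ [i])) v)
            (pvR points n r ((sepPos ++ [i]).getLastD 0))) :
    pvListMin ((pvGen n k sepPos).map (pvPm (pvBuildD n points)))
      = Option.map (fun v => max (pvPref points 0 sepPos) v)
          (pvR points n (r + 1) (sepPos.getLastD 0)) := by
  have hlen : (0:Int) ≤ (sepPos.length : Int) := Int.natCast_nonneg _
  have hr : (0:Int) ≤ (r : Int) := Int.natCast_nonneg _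
  rw [pvGen, if_neg (by omega)]
  set start := sepPos.getLastD 0 with hstart
  set L := PySem.List.pyRange (start + 1) n 1 with hL
  rw [PySem.List.foldl_append_eq_flatMap
    (fun (x : {x // x ∈ L}) => pvGen n k (sepPos ++ [x.1])) L.attach []]
  rw [List.nil_append]
  have hattach : L.attach.flatMap (fun x => pvGen n k (sepPos ++ [x.1]))
      = L.flatMap (fun i => pvGen n k (sepPos ++ [i])) := by
    conv_rhs => rw [← List.attach_map_subtype_val L]
    rw [List.flatMap_map]
  rw [hattach, List.map_flatMap]
  rw [pv_listmin_flatmap (fun i => (pvGen n k (sepPos ++ [i])).map (pvPm (pvBuildD n points))) L]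
  have hcongr : ∀ (acc : Option Int), ∀ i ∈ L,
      pvOMin acc (pvListMin ((pvGen n k (sepPos ++ [i])).map (pvPm (pvBuildD n points))))
        = pvOMin acc (Option.map (fun v => max (pvPref points 0 sepPos) v)
            (Option.map (fun v => max (pvDint points start i) v) (pvR points n r i))) := by
    intro acc i hi
    have hib := (PySem.List.mem_pyRange_one).1 hi
    rw [IH i hib.1 hib.2]
    rw [List.getLastD_concat, pv_pref_append points sepPos 0 i, ← hstart]
    rw [Option.map_map]
    congr 2
    funext v
    rw [Function.comp, max_assoc]
  rw [PySem.List.foldl_congr_mem L _ _ none (fun acc i hi => hcongr acc i hi)]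
  rw [pv_map_max_fold (pvPref points 0 sepPos)
    (fun i => Option.map (fun v => max (pvDint points start i) v) (pvR points n r i)) L]
  rfl

theorem pv_main (n k : Int) (points : List (List Int)) :
    ∀ (t : Nat) (sepPos : List Int) (r : Nat),
      (k - 1 : Int) = (sepPos.length : Int) + (r : Int) →
      (n - sepPos.getLastD 0).toNat ≤ t →
      0 ≤ sepPos.getLastD 0 →
      (∀ s ∈ sepPos, 0 ≤ s ∧ s ≤ n) →
      pvListMin ((pvGen n k sepPos).map (pvPm (pvBuildD n points)))
        = Option.map (fun v => max (pvPref points 0 sepPos) v)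
            (pvR points n r (sepPos.getLastD 0)) := by
  intro t
  induction t with
  | zero =>
    intro sepPos r h1 h2 h3 h4
    cases r with
    | zero => exact pv_main_base n k points sepPos (by omega) h4
    | succ r =>
      -- the separator range is empty: both sides are none
      rw [pvGen, if_neg (by
        have := Int.natCast_nonneg sepPos.length
        have := Int.natCast_nonneg r
        push_cast [Nat.cast_succ] at h1 ⊢
        omega)]
      rw [PySem.List.pyRange_one_eq_nil (by omega : n ≤ sepPos.getLastD 0 + 1)]
      show pvListMin [] = _
      simp only [pvR]
      rw [PySem.List.pyRange_one_eq_nil (by omega : n ≤ sepPos.getLastD 0 + 1)]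
      rfl
  | succ t ih =>
    intro sepPos r h1 h2 h3 h4
    cases r with
    | zero => exact pv_main_base n k points sepPos (by omega) h4
    | succ r =>
      apply pv_main_step n k points sepPos r (by push_cast [Nat.cast_succ] at h1 ⊢; omega) h3 h4
      intro i hi1 hi2
      apply ih (sepPos ++ [i]) r
      · simp only [List.length_append, List.length_cons, List.length_nil]
        push_cast [Nat.cast_succ] at h1 ⊢
        omega
      · rw [List.getLastD_concat]; omega
      · rw [List.getLastD_concat]; omega
      · intro s hs
        rcases List.mem_append.1 hs with h | h
        · exact h4 s h
        · simp at h; omega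

-- ---------- the two sides against pvR ----------

theorem pv_R_congr_bound (points : List (List Int)) (n m : Int)
    (hm : m = if 0 < n then n else 0) :
    ∀ (r : Nat) (prev : Int), 0 ≤ prev → pvR points n r prev = pvR points m r prev := by
  by_cases hn : 0 < n
  · rw [hm, if_pos hn]
    intro r prev _
    rfl
  · rw [hm, if_neg hn]
    intro r
    induction r with
    | zero =>
      intro prev hprev
      simp only [pvR, pvDint]
      rw [(by omega : (n - prev).toNat = (0 - prev).toNat)]
    | succ r ihr =>
      intro prev hprev
      simp only [pvR]
      rw [PySem.List.pyRange_one_eq_nil (by omega : n ≤ prev + 1),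
          PySem.List.pyRange_one_eq_nil (by omega : (0:Int) ≤ prev + 1)]
      rfl

theorem pv_solve_eq (n k : Int) (points : List (List Int)) (h : Dom_solve n k points) (hk : 1 ≤ k) :
    solve n k points
      = (match pvR points n (k - 1).toNat 0 with
          | none => pvInfinity
          | some v => min pvInfinity v) := by
  unfold solve
  have hstep : (fun cm (c : List (List Int)) => min (pvValidate c (pvBuildD n points) cm) cm)
      = (fun cm c => min (pvPm (pvBuildD n points) c) cm) := by
    funext cm c
    exact pv_validate_min c (pvBuildD n points) cm
  simp only [hstep]
  rw [pv_minfold (pvPm (pvBuildD n points)) (pvGen n k []) pvInfinity]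
  rw [pv_main n k points n.toNat [] (k - 1).toNat (by simp; omega) (by simp) (by simp)
    (by intro s hs; simp at hs)]
  simp only [pvPref, List.getLastD_nil]
  cases hR : pvR points n (k - 1).toNat 0 with
  | none => rfl
  | some v =>
    have hv := pv_R_bounds n k points h n (k - 1).toNat 0 v hR
    simp only [Option.map]
    rw [max_eq_right hv.1]

theorem pv_chebB_eq (points : List (List Int)) (j i : Int) :
    pvChebB points j i = pvCheb points j i := by
  unfold pvChebB pvCheb
  rw [abs_sub_comm (pvAt points j 0) (pvAt points i 0),
      abs_sub_comm (pvAt points j 1) (pvAt points i 1)]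

theorem pv_costrow_eq (points : List (List Int)) (a m : Int) (ha : 0 ≤ a) (ham : a ≤ m) :
    pvCostRow points a m = (PySem.List.pyRange 0 (m + 1) 1).map (fun b => pvDint points a b) := by
  suffices H : ∀ (t : Nat) (q : Int), (q - (a + 1)).toNat = t → a + 1 ≤ q → q ≤ m + 1 →
      (PySem.List.pyRange (a + 1) q 1).foldl
        (fun (st : Int × List Int) b =>
          let best := (PySem.List.pyRange a (b - 1) 1).foldl
            (fun best j => let t := pvChebB points j (b - 1); if best < t then t else best) st.1
          (best, st.2 ++ [best]))
        (0, List.replicate (a + 1).toNat 0)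
      = (pvDint points a (q - 1), (PySem.List.pyRange 0 q 1).map (fun b => pvDint points a b)) by
    have h := H (m + 1 - (a + 1)).toNat (m + 1) rfl (by omega) (le_refl _)
    unfold pvCostRow
    rw [h]
  intro t
  induction t with
  | zero =>
    intro q hq hq1 hq2
    rw [PySem.List.pyRange_one_eq_nil (by omega : q ≤ a + 1)]
    show ((0 : Int), List.replicate (a + 1).toNat 0) = _
    have h1 : pvDint points a (q - 1) = 0 := by
      unfold pvDint; rw [(by omega : (q - 1 - a).toNat = 0)]; rfl
    have h2 : (PySem.List.pyRange 0 q 1).map (fun b => pvDint points a b)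
        = List.replicate (a + 1).toNat 0 := by
      rw [List.map_congr_left (fun b hb => show pvDint points a b = (fun _ => (0:Int)) b from by
        have := (PySem.List.mem_pyRange_one).1 hb
        unfold pvDint; rw [(by omega : (b - a).toNat = 0)]; rfl)]
      rw [List.map_const', PySem.List.length_pyRange_one]
      rw [(by omega : (q - 0).toNat = (a + 1).toNat)]
    rw [h1, h2]
  | succ t ih =>
    intro q hq hq1 hq2
    have hsplit : PySem.List.pyRange (a + 1) q 1
        = PySem.List.pyRange (a + 1) (q - 1) 1 ++ [q - 1] := by
      have h := PySem.List.pyRange_one_succ_right (a := a + 1) (b := q - 1) (by omega)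
      rw [(by omega : q - 1 + 1 = q)] at h
      exact h
    rw [hsplit, List.foldl_append]
    rw [ih (q - 1) (by omega) (by omega) (by omega)]
    simp only [List.foldl]
    -- the inner loop grows the running diameter by the distances to point q-1
    have hinner : ∀ (s0 : Int), s0 = pvDint points a (q - 1 - 1) →
        (PySem.List.pyRange a (q - 1 - 1) 1).foldl
          (fun best j => if best < pvChebB points j (q - 1 - 1) then pvChebB points j (q - 1 - 1) else best) s0
        = pvDint points a (q - 1) := by
      intro s0 hs0
      rw [PySem.List.foldl_congr_mem _ _ (fun best j => max best (pvCheb points j (q - 1 - 1))) _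
        (by
          intro acc j _
          rw [pv_chebB_eq]
          show _ = max acc (pvCheb points j (q - 1 - 1))
          rcases le_or_gt (pvCheb points j (q - 1 - 1)) acc with h | h
          · rw [if_neg (by omega), max_eq_left h]
          · rw [if_pos h, max_eq_right (by omega)])]
      have ht' : (q - 1 - a).toNat = (q - 1 - 1 - a).toNat + 1 := by omega
      have hrec : pvDint points a (q - 1) = (PySem.List.pyRange a (a + ((q - 1 - 1 - a).toNat : Int)) 1).foldl
          (fun best j => max best (pvCheb points j (a + ((q - 1 - 1 - a).toNat : Int))))
          (pvDn points a (q - 1 - 1 - a).toNat) := by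
        unfold pvDint
        rw [ht']
        rfl
      rw [hrec, (by omega : a + ((q - 1 - 1 - a).toNat : Int) = q - 1 - 1)]
      rw [hs0]
      unfold pvDint
      rfl
    rw [hinner _ rfl]
    have hsp2 : PySem.List.pyRange 0 q 1 = PySem.List.pyRange 0 (q - 1) 1 ++ [q - 1] := by
      have h := PySem.List.pyRange_one_succ_right (a := 0) (b := q - 1) (by omega)
      rw [(by omega : q - 1 + 1 = q)] at h
      exact h
    rw [hsp2, List.map_append]
    rfl

theorem pv_cost_at (points : List (List Int)) (m a b : Int)
    (ha : 0 ≤ a) (ham : a ≤ m) (hb : 0 ≤ b) (hbm : b ≤ m) :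
    pvAt (pvCost points m) a b = pvDint points a b := by
  have hcost : pvCost points m
      = (PySem.List.pyRange 0 m 1).map (fun a => pvCostRow points a m)
        ++ [List.replicate (m + 1).toNat 0] := by
    unfold pvCost
    rw [PySem.List.foldl_append_singleton_eq_map]
    rfl
  unfold pvAt
  by_cases ham' : a < m
  · have hrow : PySem.List.pyGetD (pvCost points m) a [] = pvCostRow points a m := by
      rw [hcost, PySem.List.pyGetD_eq_getElem _ _ ha (by
        simp only [List.length_append, List.length_map, PySem.List.length_pyRange_one,
          List.length_cons, List.length_nil]
        omega)]
      rw [List.getElem_append_left (by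
        simp only [List.length_map, PySem.List.length_pyRange_one]
        omega)]
      rw [List.getElem_map]
      rw [PySem.List.getElem_pyRange_one]
      rw [(by omega : (0 : Int) + (a.toNat : Int) = a)]
    rw [hrow, pv_costrow_eq points a m ha ham]
    exact PySem.List.pyGetD_map_pyRange_of_nonneg _ (m + 1) b 0 hb (by omega)
  · have ham2 : a = m := by omega
    subst ham2
    have hrow : PySem.List.pyGetD (pvCost points a) a [] = List.replicate (a + 1).toNat 0 := by
      rw [hcost]
      have hlen : a = (((PySem.List.pyRange 0 a 1).map (fun x => pvCostRow points x a)).length : Int) := by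
        simp only [List.length_map, PySem.List.length_pyRange_one]
        omega
      have hget := PySem.List.pyGet?_append_length
        ((PySem.List.pyRange 0 a 1).map (fun x => pvCostRow points x a))
        [] (List.replicate (a + 1).toNat 0)
      rw [← hlen] at hget
      unfold PySem.List.pyGetD
      rw [hget]
      rfl
    rw [hrow]
    rw [PySem.List.pyGetD_eq_getElem _ _ hb (by simp only [List.length_replicate]; omega)]
    rw [List.getElem_replicate]
    unfold pvDint
    rw [(by omega : (b - a).toNat = 0)]
    rfl

theorem pv_R_none (points : List (List Int)) (m : Int) :
    ∀ (r : Nat) (prev : Int), 1 ≤ r → m ≤ prev + r → pvR points m r prev = none := by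
  intro r
  induction r with
  | zero => intro prev h1 _; omega
  | succ r ihr =>
    intro prev _ h2
    show (PySem.List.pyRange (prev + 1) m 1).foldl
      (fun acc i => pvOMin acc (Option.map (max (pvDint points prev i)) (pvR points m r i))) none = none
    by_cases hr1 : r = 0
    · subst hr1
      rw [PySem.List.pyRange_one_eq_nil (by push_cast at h2; omega)]
      rfl
    · have gen : ∀ (l : List Int), (∀ i ∈ l, prev + 1 ≤ i) → ∀ (acc : Option Int),
          l.foldl (fun acc i =>
            pvOMin acc (Option.map (max (pvDint points prev i)) (pvR points m r i))) acc = acc := by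
        intro l
        induction l with
        | nil => intro _ acc; rfl
        | cons i t iht =>
          intro hmem acc
          simp only [List.foldl]
          rw [ihr i (by omega) (by
            have := hmem i (List.mem_cons_self ..)
            push_cast at h2 ⊢
            omega)]
          show t.foldl _ (pvOMin acc none) = acc
          have : pvOMin acc none = acc := by cases acc <;> rfl
          rw [this]
          exact iht (fun j hj => hmem j (List.mem_cons_of_mem _ hj)) acc
      exact gen (PySem.List.pyRange (prev + 1) m 1)
        (fun i hi => ((PySem.List.mem_pyRange_one).1 hi).1) none

theorem pv_solve_alt_eq (n k : Int) (points : List (List Int)) (h : Dom_solve n k points)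
    (hk : 1 ≤ k) :
    solve_alt n k points
      = (match pvR points (if 0 < n then n else 0) (k - 1).toNat 0 with
          | none => pvInfinity
          | some v => min pvInfinity v) := by
  unfold solve_alt
  rw [if_neg (by omega)]
  set m : Int := if 0 < n then n else 0 with hm
  have hm0 : 0 ≤ m := by rw [hm]; split <;> omega
  by_cases hgap : 1 < k ∧ m < k
  case pos =>
    rw [if_pos hgap]
    rw [pv_R_none points m (k - 1).toNat 0 (by omega) (by push_cast; omega)]
  rw [if_neg hgap]
  have hDb : ∀ (a i : Int), 0 ≤ pvDint points a i ∧ pvDint points a i ≤ 4294967296 :=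
    fun a i => ⟨pv_dn_nonneg points a _, pv_dn_bound n k points h a _⟩
  have hBIG : (4294967296 : Int) < pvBIG := by norm_num [pvBIG]
  -- dp0 is the r = 0 table
  have hdp0 : (PySem.List.pyRange 0 (m + 1) 1).map (fun a => pvAt (pvCost points m) a m)
      = (PySem.List.pyRange 0 (m + 1) 1).map (fun a => (pvR points m 0 a).getD pvBIG) := by
    apply List.map_congr_left
    intro a ha
    have hab := (PySem.List.mem_pyRange_one).1 ha
    rw [pv_cost_at points m a m hab.1 (by omega) hm0 (le_refl m)]
    rfl
  -- one dp iteration moves the table from r to r + 1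
  have hstep : ∀ (dp : List Int) (r : Nat),
      dp = (PySem.List.pyRange 0 (m + 1) 1).map (fun a => (pvR points m r a).getD pvBIG) →
      (PySem.List.pyRange 0 (m + 1) 1).map (fun a =>
        (PySem.List.pyRange (a + 1) m 1).foldl
          (fun best i => min best (max (pvAt (pvCost points m) a i) (PySem.List.pyGetD dp i 0)))
          pvBIG)
      = (PySem.List.pyRange 0 (m + 1) 1).map (fun a => (pvR points m (r + 1) a).getD pvBIG) := by
    intro dp r hdp
    apply List.map_congr_left
    intro a ha
    have hab := (PySem.List.mem_pyRange_one).1 ha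
    have key : ∀ (l : List Int), (∀ i ∈ l, 0 ≤ i ∧ i < m) →
        ∀ (acc : Option Int), (∀ w, acc = some w → 0 ≤ w ∧ w ≤ 4294967296) →
        l.foldl (fun best i => min best (max (pvAt (pvCost points m) a i) (PySem.List.pyGetD dp i 0)))
          (acc.getD pvBIG)
        = (l.foldl (fun acc i =>
            pvOMin acc (Option.map (fun v => max (pvDint points a i) v) (pvR points m r i))) acc).getD pvBIG := by
      intro l
      induction l with
      | nil => intro _ acc _; rfl
      | cons i t iht =>
        intro hmem acc hacc
        have hib := hmem i (List.mem_cons_self ..)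
        have hcost : pvAt (pvCost points m) a i = pvDint points a i :=
          pv_cost_at points m a i hab.1 (by omega) hib.1 (by omega)
        have hdpi : PySem.List.pyGetD dp i 0 = (pvR points m r i).getD pvBIG := by
          rw [hdp]
          exact PySem.List.pyGetD_map_pyRange_of_nonneg _ (m + 1) i 0 hib.1 (by omega)
        simp only [List.foldl, hcost, hdpi]
        have hD := hDb a i
        cases hacc2 : acc with
        | none =>
          cases hri : pvR points m r i with
          | none =>
            simp only [Option.map, pvOMin, Option.getD]
            rw [max_eq_right (by omega : pvDint points a i ≤ pvBIG), min_self]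
            exact iht (fun j hj => hmem j (List.mem_cons_of_mem _ hj)) none (by simp)
          | some u =>
            have hu := pv_R_bounds n k points h m r i u hri
            have hmx : max (pvDint points a i) u ≤ 4294967296 := max_le hD.2 hu.2
            simp only [Option.map, pvOMin, Option.getD]
            rw [min_eq_right (by omega : max (pvDint points a i) u ≤ pvBIG)]
            exact iht (fun j hj => hmem j (List.mem_cons_of_mem _ hj))
              (some (max (pvDint points a i) u))
              (by intro w hw; injection hw with hw; subst hw; exact ⟨by omega, hmx⟩)
        | some w =>
          have hw := hacc w hacc2
          cases hri : pvR points m r i with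
          | none =>
            simp only [Option.map, pvOMin, Option.getD]
            rw [max_eq_right (by omega : pvDint points a i ≤ pvBIG),
                min_eq_left (by omega : w ≤ pvBIG)]
            exact iht (fun j hj => hmem j (List.mem_cons_of_mem _ hj)) (some w)
              (by intro w' hw'; injection hw' with hw'; subst hw'; exact hw)
          | some u =>
            have hu := pv_R_bounds n k points h m r i u hri
            have hmx : max (pvDint points a i) u ≤ 4294967296 := max_le hD.2 hu.2
            simp only [Option.map, pvOMin, Option.getD]
            exact iht (fun j hj => hmem j (List.mem_cons_of_mem _ hj))
              (some (min w (max (pvDint points a i) u)))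
              (by
                intro w' hw'; injection hw' with hw'; subst hw'
                exact ⟨le_min hw.1 (by omega), le_trans (min_le_left _ _) hw.2⟩)
    have hk2 := key (PySem.List.pyRange (a + 1) m 1)
      (fun i hi => by have := (PySem.List.mem_pyRange_one).1 hi; omega)
      none (by simp)
    simp only [Option.getD] at hk2
    rw [hk2]
    rfl
  -- iterating k-1 times yields the r = k-1 table
  have hloop : ∀ (l : List Int) (dp : List Int) (r : Nat),
      dp = (PySem.List.pyRange 0 (m + 1) 1).map (fun a => (pvR points m r a).getD pvBIG) →
      l.foldl (fun dp _ =>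
        (PySem.List.pyRange 0 (m + 1) 1).map (fun a =>
          (PySem.List.pyRange (a + 1) m 1).foldl
            (fun best i => min best (max (pvAt (pvCost points m) a i) (PySem.List.pyGetD dp i 0)))
            pvBIG)) dp
      = (PySem.List.pyRange 0 (m + 1) 1).map (fun a => (pvR points m (r + l.length) a).getD pvBIG) := by
    intro l
    induction l with
    | nil =>
      intro dp r hdp
      simp only [List.foldl, List.length_nil, Nat.add_zero]
      exact hdp
    | cons x t iht =>
      intro dp r hdp
      simp only [List.foldl, List.length_cons]
      rw [(by omega : r + (t.length + 1) = (r + 1) + t.length)]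
      exact iht _ (r + 1) (hstep dp r hdp)
  have hfin := hloop (PySem.List.pyRange 0 (k - 1) 1)
    ((PySem.List.pyRange 0 (m + 1) 1).map (fun a => pvAt (pvCost points m) a m)) 0
    (by rw [hdp0])
  rw [PySem.List.length_pyRange_one] at hfin
  rw [(by omega : (0 : Nat) + (k - 1 - 0).toNat = (k - 1).toNat)] at hfin
  simp only [hfin]
  simp only [PySem.List.pyGetD_map_pyRange_of_nonneg
    (fun a => (pvR points m (k - 1).toNat a).getD pvBIG) (m + 1) 0 0 (le_refl 0) (by omega)]
  cases hR : pvR points m (k - 1).toNat 0 with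
  | none =>
    simp only [Option.getD]
    rw [if_neg (by norm_num [pvBIG, pvInfinity])]
  | some v =>
    have hv := pv_R_bounds n k points h m (k - 1).toNat 0 v hR
    simp only [Option.getD, min_def]
    split_ifs <;> omega


-- ===== VERDICT (by name: the statement is the Claim_ definition above) =====
theorem solve_spec : Claim_equal_solve := by
  intro n k points hdom hpre
  unfold Spec_solve
  by_cases hk : 1 ≤ k
  · rw [pv_solve_eq n k points hdom hk, pv_solve_alt_eq n k points hdom hk,
        pv_R_congr_bound points n (if 0 < n then n else 0) rfl (k-1).toNat 0 (le_refl 0)]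
  · have h1 : solve n k points = pvInfinity := by
      unfold solve
      rw [pv_gen_empty n k (by omega) []]
      rfl
    have h2 : solve_alt n k points = pvInfinity := by
      unfold solve_alt
      rw [if_pos (by omega)]
    rw [h1, h2]
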